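-- pv_equiv track=rewrite | github.com/wangcong386/PythonProject | MiscTest/向右延伸测试.py | get_fitting_curve_stop_point
-- ===== SOURCE A (Python) =====
-- def get_fitting_curve_stop_point(curve, is2m=0):
--     stop_point_thre = 15
--     if is2m == 1:
--         for i in range(len(curve) - 2, -1, -1):
--             if (curve[i] - curve[-1] > stop_point_thre):
--                 return i + 1, curve[i + 1]
--     else:
--         for i in range(len(curve) - 2, -1, -1):
--             if (curve[i] == curve[-1]):
--                 return i + 1, curve[i + 1]
-- ===== SOURCE B (Python) =====
-- def get_fitting_curve_stop_point(curve, is2m=0):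
--     # Forward single pass: track the last (largest) matching index, then return once.
--     if len(curve) < 2:
--         return None
--     last = curve[-1]
--     best = -1
--     for i in range(len(curve) - 1):
--         if (last - curve[i] < -15) if is2m == 1 else (curve[i] == last):
--             best = i
--     if best >= 0:
--         return best + 1, curve[best + 1]
--     return None
-- ===== Notes on version B (the rewrite author's own statement) =====
-- stated objective: alternative
-- what changed: Replaced the backward early-return scan with a forward single pass that accumulates the last matching index in a 'best' variable and returns once after the loop.
import Mathlib
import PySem

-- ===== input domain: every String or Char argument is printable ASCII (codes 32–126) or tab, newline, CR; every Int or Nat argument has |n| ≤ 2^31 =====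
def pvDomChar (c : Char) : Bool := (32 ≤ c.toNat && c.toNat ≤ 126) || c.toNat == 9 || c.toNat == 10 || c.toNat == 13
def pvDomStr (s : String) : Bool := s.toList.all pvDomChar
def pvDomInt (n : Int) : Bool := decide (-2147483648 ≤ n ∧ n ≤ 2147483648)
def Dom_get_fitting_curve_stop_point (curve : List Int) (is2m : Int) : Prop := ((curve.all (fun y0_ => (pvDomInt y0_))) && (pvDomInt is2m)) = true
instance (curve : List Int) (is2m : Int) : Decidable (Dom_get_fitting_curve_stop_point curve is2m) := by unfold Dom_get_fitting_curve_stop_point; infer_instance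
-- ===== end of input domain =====

-- B replaces A's backward early-return scan by a forward pass accumulating the last matching
-- index ('alternative', same cost); return values proved equal on all inputs.

-- ===== PORT A =====
-- A's 'for i in range(len(curve)-2, -1, -1): if cond: return i+1, curve[i+1]' loop; the
-- two Python loops differ only in their condition, passed here as p.
-- All index accesses are in range (0 ≤ i ≤ len-2 and curve ≠ [] whenever the body runs),
-- so pyGetD with default 0 is exact.
def pvLoopA (curve : List Int) (p : Int → Bool) : List Int → Option (Int × Int)
  | [] => none
  | i :: rest =>
    if p i then some (i + 1, PySem.List.pyGetD curve (i + 1) 0)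
    else pvLoopA curve p rest

def get_fitting_curve_stop_point (curve : List Int) (is2m : Int) : Option (Int × Int) :=
  if is2m == 1 then
    pvLoopA curve
      (fun i => decide (PySem.List.pyGetD curve i 0 - PySem.List.pyGetD curve (-1) 0 > 15))
      (PySem.List.pyRange ((curve.length : Int) - 2) (-1) (-1))
  else
    pvLoopA curve
      (fun i => PySem.List.pyGetD curve i 0 == PySem.List.pyGetD curve (-1) 0)
      (PySem.List.pyRange ((curve.length : Int) - 2) (-1) (-1))

-- ===== PORT B =====
-- forward single pass over range(len-1) keeping the last matching index in 'best'
def get_fitting_curve_stop_point_alt (curve : List Int) (is2m : Int) : Option (Int × Int) :=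
  if (curve.length : Int) < 2 then none
  else
    let last := PySem.List.pyGetD curve (-1) 0
    let best := (PySem.List.pyRange 0 ((curve.length : Int) - 1) 1).foldl
      (fun b i =>
        if (if is2m == 1 then decide (last - PySem.List.pyGetD curve i 0 < -15)
            else PySem.List.pyGetD curve i 0 == last) then i else b) (-1)
    if best ≥ 0 then some (best + 1, PySem.List.pyGetD curve (best + 1) 0) else none

-- ===== PRECONDITION & SPEC =====
def Spec_get_fitting_curve_stop_point (curve : List Int) (is2m : Int) (out : Option (Int × Int)) : Prop := out = get_fitting_curve_stop_point_alt curve is2m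
instance (curve : List Int) (is2m : Int) (out : Option (Int × Int)) : Decidable (Spec_get_fitting_curve_stop_point curve is2m out) := by unfold Spec_get_fitting_curve_stop_point; infer_instance

-- ===== CLAIM (what is proved, stated in full; the proofs are below) =====
def Claim_equal_get_fitting_curve_stop_point : Prop := ∀ (curve : List Int) (is2m : Int), Dom_get_fitting_curve_stop_point curve is2m → Spec_get_fitting_curve_stop_point curve is2m (get_fitting_curve_stop_point curve is2m)

-- ===== LEMMAS AND PROOFS =====

-- A's loop is the first match of p in its index list, mapped to the returned pair.
theorem pvLoopA_eq_find (curve : List Int) (p : Int → Bool) (l : List Int) :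
    pvLoopA curve p l
      = (l.find? p).map (fun i => (i + 1, PySem.List.pyGetD curve (i + 1) 0)) := by
  induction l with
  | nil => simp [pvLoopA]
  | cons a l ih =>
    by_cases h : p a <;> simp [pvLoopA, List.find?, h, ih]

-- B's accumulator: the last match in l (i.e. the first match of the reversed list), else b.
theorem foldl_best (p : Int → Bool) (l : List Int) (b : Int) :
    l.foldl (fun acc i => if p i then i else acc) b
      = (match l.reverse.find? p with | some i => i | none => b) := by
  induction l generalizing b with
  | nil => simp
  | cons a l ih =>
    simp only [List.foldl_cons, ih, List.reverse_cons, List.find?_append]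
    cases h : l.reverse.find? p with
    | some i => simp
    | none => by_cases hp : p a <;> simp [List.find?, hp]

theorem get_fitting_curve_stop_point_spec' (curve : List Int) (is2m : Int) :
    get_fitting_curve_stop_point curve is2m = get_fitting_curve_stop_point_alt curve is2m := by
  unfold get_fitting_curve_stop_point get_fitting_curve_stop_point_alt
  by_cases hn : (curve.length : Int) < 2
  · have hr : PySem.List.pyRange ((curve.length : Int) - 2) (-1) (-1) = [] :=
      PySem.List.pyRange_neg_one_eq_nil (by omega)
    simp [hr, pvLoopA, hn]
  · simp only [if_neg hn]
    have hrev : PySem.List.pyRange ((curve.length : Int) - 2) (-1) (-1)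
        = (PySem.List.pyRange 0 ((curve.length : Int) - 1) 1).reverse := by
      rw [PySem.List.pyRange_neg_one_eq_reverse, show (-1:Int)+1 = 0 from by norm_num,
        show ((curve.length : Int) - 2) + 1 = (curve.length : Int) - 1 from by ring]
    -- unify the two conditions
    set last := PySem.List.pyGetD curve (-1) 0 with hlast
    have hcond : (fun i => if is2m == 1 then
          decide (PySem.List.pyGetD curve i 0 - last > 15)
        else (PySem.List.pyGetD curve i 0 == last))
        = (fun i => if is2m == 1 then decide (last - PySem.List.pyGetD curve i 0 < -15)
            else (PySem.List.pyGetD curve i 0 == last)) := by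
      funext i
      by_cases h1 : is2m == 1 <;> simp [h1]
      omega
    set p : Int → Bool := fun i =>
      if is2m == 1 then decide (last - PySem.List.pyGetD curve i 0 < -15)
      else (PySem.List.pyGetD curve i 0 == last) with hp
    have hA : (if is2m == 1 then
        pvLoopA curve (fun i => decide (PySem.List.pyGetD curve i 0 - last > 15))
          (PySem.List.pyRange ((curve.length : Int) - 2) (-1) (-1))
      else pvLoopA curve (fun i => PySem.List.pyGetD curve i 0 == last)
          (PySem.List.pyRange ((curve.length : Int) - 2) (-1) (-1)))
        = pvLoopA curve p (PySem.List.pyRange ((curve.length : Int) - 2) (-1) (-1)) := by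
      by_cases h1 : is2m == 1 <;> simp only [h1, if_true, if_false, Bool.false_eq_true] <;>
        congr 1 <;> funext i <;> have := congrFun hcond i <;> simp [h1, hp] at this ⊢ <;>
        simp [this]
    rw [hA, pvLoopA_eq_find, hrev, foldl_best]
    cases hf : (PySem.List.pyRange 0 ((curve.length : Int) - 1) 1).reverse.find? p with
    | none => simp
    | some i =>
      have hi : i ∈ PySem.List.pyRange 0 ((curve.length : Int) - 1) 1 := by
        have := List.mem_of_find?_eq_some hf
        simpa using this
      have hi0 : 0 ≤ i := ((PySem.List.mem_pyRange_one).1 hi).1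
      simp [hi0]

-- ===== VERDICT (by name: the statement is the Claim_ definition above) =====
theorem get_fitting_curve_stop_point_spec : Claim_equal_get_fitting_curve_stop_point := by
  intro curve is2m _
  exact get_fitting_curve_stop_point_spec' curve is2m
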